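-- pv_equiv track=rewrite | github.com/hanishkvc/prgs-health-covid19-eutoolkit | .simpsvc/copy/hkvc-covid-toolkit.py | _simpler_csvline
-- ===== SOURCE A (Python) =====
-- def _simpler_csvline(lIn, colDelim=",", strDelim='"', replaceChr="_"):
--     """ Clean up the passed csv line, to make it safe for simple csv parsing
--         Check if there are any string delimiter [default: "] in the line.
--             Based on pairing of string delimiter logic, decide whether
--             checking within a string or outside a string.
--         Within a string, check if there is the column delimter [default: ,]
--             If found, then replace with replaceChar [ default: _]
--         """
--     bInStr = False
--     lOut = ""
--     for i in range(len(lIn)):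
--         cCur = lIn[i]
--         if lIn[i] == strDelim:
--             bInStr = not bInStr
--         if lIn[i] == colDelim:
--             if bInStr:
--                 cCur = replaceChr
--         lOut += cCur
--     return lOut
-- ===== SOURCE B (Python) =====
-- def _simpler_csvline(lIn, colDelim=",", strDelim='"', replaceChr="_"):
--     """A character sits inside a quoted string exactly when an odd number of
--     string-delimiter characters occur up to and including its position; the
--     column delimiter is replaced at precisely those positions."""
--     return "".join(
--         replaceChr
--         if ch == colDelim and sum(1 for d in lIn[:i + 1] if d == strDelim) % 2 == 1
--         else ch
--         for i, ch in enumerate(lIn))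
-- ===== Notes on version B (the rewrite author's own statement) =====
-- stated objective: alternative
-- what changed: Replaces the sequential toggle-a-flag state machine with a stateless positional formulation: a character is inside a quoted string iff an odd number of string-delimiter characters occur in the prefix up to and including it, so the output is a single comprehension over enumerated positions (at the price of recounting the prefix per position).
import Mathlib
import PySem

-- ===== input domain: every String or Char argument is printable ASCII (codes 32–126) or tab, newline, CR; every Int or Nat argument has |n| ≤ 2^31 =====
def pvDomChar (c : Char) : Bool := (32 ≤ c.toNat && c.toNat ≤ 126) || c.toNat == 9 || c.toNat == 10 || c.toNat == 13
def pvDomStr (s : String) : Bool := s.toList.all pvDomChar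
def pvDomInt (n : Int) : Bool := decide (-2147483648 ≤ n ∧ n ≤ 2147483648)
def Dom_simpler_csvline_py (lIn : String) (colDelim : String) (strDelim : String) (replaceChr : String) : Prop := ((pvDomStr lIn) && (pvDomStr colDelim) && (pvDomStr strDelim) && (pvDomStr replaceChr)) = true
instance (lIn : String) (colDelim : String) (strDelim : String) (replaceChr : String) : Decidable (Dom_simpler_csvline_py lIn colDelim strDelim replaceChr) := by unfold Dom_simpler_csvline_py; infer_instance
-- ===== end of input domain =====

-- B replaces A's sequential toggle-a-flag state machine by a stateless positional
-- formulation (inside a quoted string = odd number of string delimiters in the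
-- prefix up to and including the position), a different decomposition of the task.

-- ===== PORT A =====
-- Port of A: index loop over the line, toggling bInStr on the string delimiter
-- and replacing the column delimiter while inside a string.  Python's lIn[i]
-- is a one-character string; its comparisons lIn[i] == strDelim / colDelim are
-- ported as [ch] == strDelim.toList etc., which is exact.
def simpler_csvline_py (lIn : String) (colDelim : String) (strDelim : String) (replaceChr : String) : String :=
  String.ofList
    ((PySem.List.pyRange 0 (PySem.Str.len lIn) 1).foldl
      (fun (st : Bool × List Char) i =>
        let ch := PySem.List.pyGetD lIn.toList i ' '
        let bInStr := if [ch] == strDelim.toList then !st.1 else st.1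
        let cCur := if [ch] == colDelim.toList && bInStr then replaceChr.toList else [ch]
        (bInStr, st.2 ++ cCur))
      (false, [])).2

-- ===== PORT B =====
-- Port of Source B, step for step: one comprehension over enumerate(lIn); for each
-- position, 'sum(1 for d in lIn[:i+1] if d == strDelim)' is the sum of the
-- constant 1 over the filtered prefix slice; ch == colDelim / d == strDelim are
-- char-vs-string comparisons, ported as [ch] == colDelim.toList etc.;
-- "".join of the produced pieces is flatten at the character level.
def simpler_csvline_py_alt (lIn : String) (colDelim : String) (strDelim : String) (replaceChr : String) : String :=
  String.ofList
    (((PySem.List.enumerate lIn.toList).map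
        (fun p =>
          if ([p.2] == colDelim.toList) &&
             (PySem.Int.mod
                (((PySem.List.slice lIn.toList none (some (p.1 + 1))).filter
                    (fun d => [d] == strDelim.toList)).map (fun _ => (1 : Int))).sum 2 == 1)
          then replaceChr.toList else [p.2])).flatten)

-- ===== PRECONDITION & SPEC =====
-- (A is total: no Pre_.)
def Spec_simpler_csvline_py (lIn : String) (colDelim : String) (strDelim : String) (replaceChr : String) (out : String) : Prop := out = simpler_csvline_py_alt lIn colDelim strDelim replaceChr
instance (lIn : String) (colDelim : String) (strDelim : String) (replaceChr : String) (out : String) : Decidable (Spec_simpler_csvline_py lIn colDelim strDelim replaceChr out) := by unfold Spec_simpler_csvline_py; infer_instance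

-- ===== CLAIM (what is proved, stated in full; the proofs are below) =====
def Claim_equal_simpler_csvline_py : Prop := ∀ (lIn : String) (colDelim : String) (strDelim : String) (replaceChr : String), Dom_simpler_csvline_py lIn colDelim strDelim replaceChr → Spec_simpler_csvline_py lIn colDelim strDelim replaceChr (simpler_csvline_py lIn colDelim strDelim replaceChr)

-- ===== LEMMAS AND PROOFS =====

-- A's scan, written as structural recursion on the characters; qs/cs are the
-- delimiters' character lists (a one-character comparison [x] = qs)
def pvScanG (qs cs r : List Char) : List Char → Bool → List Char
  | [], _ => []
  | x :: xs, b =>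
    let b' := if [x] = qs then !b else b
    (if [x] = cs ∧ b' then r else [x]) ++ pvScanG qs cs r xs b'

-- the in-a-string state after a prefix: parity of the string delimiters in it
def pvInQ (qs : List Char) (pre : List Char) : Bool :=
  (pre.countP (fun d => [d] == qs)) % 2 == 1

-- A's fold over the indices equals the structural scan
theorem pvFoldG (qs cs r : List Char) :
    ∀ (l : List Char) (b : Bool) (out : List Char),
      (l.foldl
        (fun (st : Bool × List Char) ch =>
          (if ([ch] == qs) = true then !st.1 else st.1,
            st.2 ++
              if ([ch] == cs && if ([ch] == qs) = true then !st.1 else st.1) = true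
                then r else [ch]))
        (b, out)).2 = out ++ pvScanG qs cs r l b := by
  intro l
  induction l with
  | nil => intro b out; simp [pvScanG]
  | cons x xs ih =>
    intro b out
    simp only [List.foldl_cons, ih, pvScanG]
    have h1 : ([x] == qs) = decide ([x] = qs) := by by_cases h : [x] = qs <;> simp [h]
    have h2 : ([x] == cs) = decide ([x] = cs) := by by_cases h : [x] = cs <;> simp [h]
    simp only [h1, h2]
    by_cases hq : [x] = qs <;> by_cases hc : [x] = cs <;>
      cases b <;> simp [hq, hc, List.append_assoc]

theorem pvParitySucc (n : Nat) : ((n + 1) % 2 == 1) = !(n % 2 == 1) := by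
  rcases Nat.even_or_odd n with h | h
  · have h0 : n % 2 = 0 := Nat.even_iff.mp h
    have h1 : (n + 1) % 2 = 1 := by omega
    simp [h0, h1]
  · have h0 : n % 2 = 1 := Nat.odd_iff.mp h
    have h1 : (n + 1) % 2 = 0 := by omega
    simp [h0, h1]

-- the scan, positionally: position k of l is replaced iff its character is the
-- column delimiter and the prefix through k holds an odd number of string
-- delimiters (pre = the characters already processed, b = the state they left)
theorem pvScan_pre (qs cs r : List Char) :
    ∀ (l pre : List Char) (b : Bool), b = pvInQ qs pre →
      pvScanG qs cs r l b =
        ((PySem.List.enumerate l (pre.length : Int)).map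
          (fun p => if ([p.2] == cs) && pvInQ qs ((pre ++ l).take (p.1.toNat + 1))
                    then r else [p.2])).flatten := by
  intro l
  induction l with
  | nil => intro pre b hb; simp [pvScanG, PySem.List.enumerate_nil]
  | cons x xs ih =>
    intro pre b hb
    rw [PySem.List.enumerate_cons, List.map_cons, List.flatten_cons]
    have hb' : (if [x] = qs then !b else b) = pvInQ qs (pre ++ [x]) := by
      by_cases hx : [x] = qs
      · have hpx : (fun d => [d] == qs) x = true := by simpa using hx
        have h1 : List.countP (fun d => [d] == qs) [x] = 1 := by simp [hpx]
        rw [if_pos hx, hb]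
        unfold pvInQ
        rw [List.countP_append, h1, pvParitySucc]
      · have hpx : (fun d => [d] == qs) x = false := by simpa using hx
        have h1 : List.countP (fun d => [d] == qs) [x] = 0 := by simp [hpx]
        rw [if_neg hx, hb]
        unfold pvInQ
        rw [List.countP_append, h1, Nat.add_zero]
    have hhead : (pre ++ x :: xs).take ((pre.length : Int).toNat + 1) = pre ++ [x] := by
      rw [show (pre.length : Int).toNat = pre.length from by simp]
      rw [List.take_append, List.take_of_length_le (Nat.le_add_right pre.length 1)]
      norm_num
    have htail : pvScanG qs cs r xs (if [x] = qs then !b else b)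
        = ((PySem.List.enumerate xs ((pre.length : Int) + 1)).map
            (fun p => if ([p.2] == cs) && pvInQ qs ((pre ++ x :: xs).take (p.1.toNat + 1))
                      then r else [p.2])).flatten := by
      rw [ih (pre ++ [x]) _ hb']
      have h1 : ((pre ++ [x]).length : Int) = (pre.length : Int) + 1 := by simp
      have h2 : (pre ++ [x]) ++ xs = pre ++ x :: xs := by simp
      rw [h1, h2]
    rw [pvScanG, htail, hhead, ← hb']
    by_cases hc : [x] = cs
    · by_cases hq : [x] = qs <;> cases b <;> simp [hc, hq]
    · by_cases hq : [x] = qs <;> cases b <;> simp [hc, hq]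

-- ===== VERDICT (by name: the statement is the Claim_ definition above) =====
theorem simpler_csvline_py_spec : Claim_equal_simpler_csvline_py := by
  intro lIn colDelim strDelim replaceChr _
  unfold Spec_simpler_csvline_py simpler_csvline_py simpler_csvline_py_alt
  -- A's fold = structural scan
  rw [show PySem.Str.len lIn = (lIn.toList.length : Int) from by simp [PySem.Str.len]]
  rw [PySem.List.foldl_pyRange_zero_pyGetD' lIn.toList ' '
        (fun (st : Bool × List Char) ch =>
          (if ([ch] == strDelim.toList) = true then !st.1 else st.1,
            st.2 ++
              if ([ch] == colDelim.toList && if ([ch] == strDelim.toList) = true then !st.1 else st.1) = true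
                then replaceChr.toList else [ch]))
        (false, [])]
  rw [pvFoldG strDelim.toList colDelim.toList replaceChr.toList lIn.toList false []]
  rw [pvScan_pre strDelim.toList colDelim.toList replaceChr.toList lIn.toList [] false
        (by simp [pvInQ])]
  simp only [List.length_nil, Nat.cast_zero, List.nil_append]
  congr 1
  apply congrArg List.flatten
  apply List.map_congr_left
  intro p hp
  obtain ⟨k, hk, rfl⟩ := (PySem.List.mem_enumerate_iff _ _ _).mp hp
  have hidx : ((0 : Int) + (k : Int)).toNat = k := by simp
  have hslice : PySem.List.slice lIn.toList none (some ((0 : Int) + (k : Int) + 1))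
      = lIn.toList.take (k + 1) := by
    rw [show ((0 : Int) + (k : Int) + 1) = ((k + 1 : Nat) : Int) from by push_cast; ring]
    exact PySem.List.slice_to_natCast lIn.toList (k + 1)
  have hsum : ∀ (ys : List Char),
      ((ys.filter (fun d => [d] == strDelim.toList)).map (fun _ => (1 : Int))).sum
        = ((ys.countP (fun d => [d] == strDelim.toList) : Nat) : Int) := by
    intro ys
    rw [List.countP_eq_length_filter]
    induction ys.filter (fun d => [d] == strDelim.toList) with
    | nil => simp
    | cons z zs ihz => simp [ihz]; ring
  rw [hslice, hidx, hsum]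
  rw [show ((2 : Int) = ((2 : Nat) : Int)) from rfl, PySem.Int.mod_natCast]
  have hmod : ((((lIn.toList.take (k + 1)).countP (fun d => [d] == strDelim.toList) % 2 : Nat) : Int) == 1)
      = (((lIn.toList.take (k + 1)).countP (fun d => [d] == strDelim.toList)) % 2 == 1) := by
    rcases Nat.even_or_odd ((lIn.toList.take (k + 1)).countP (fun d => [d] == strDelim.toList)) with h | h
    · have h0 := Nat.even_iff.mp h; simp [h0]
    · have h0 := Nat.odd_iff.mp h; simp [h0]
  rw [hmod]
  rfl
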